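-- pv_equiv track=rewrite | github.com/TINOREJI/AI-Powered-Log-Monitoring-Incident-Analysis-System | src/severity/severity.py | assign_severity
-- ===== SOURCE A (Python) =====
-- SEVERITY_MAP = {
--     "Security Alert": "High",
--     "Server Error": "Critical",
--     "Client Error": "Medium",
--     "System Error": "High",
--     "Resource Usage": "Medium",
--     "HTTP Activity": "Low",
--     "Info": "Low",
--     "Redirect": "Low",
--     "Other": "Low",
--     "System Activity": "Low",
-- }
--
-- def assign_severity(category: str, log: str = ""):
--     log_lower = log.lower()
--
--     # 🔥 Dynamic overrides
--
--     # Security escalation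
--     if category == "Security Alert":
--         if any(x in log_lower for x in ["failed password", "unauthorized", "invalid user"]):
--             return "Critical"
--
--     # System error escalation
--     if category in ["System Error", "Server Error"]:
--         if "timeout" in log_lower or "crash" in log_lower:
--             return "Critical"
--
--     # Resource escalation
--     if category == "Resource Usage":
--         if any(x in log_lower for x in ["95%", "98%", "99%"]):
--             return "High"
--
--     # Default mapping
--     return SEVERITY_MAP.get(category, "Low")
-- ===== SOURCE B (Python) =====
-- SEVERITY_MAP = {
--     "Security Alert": "High",
--     "Server Error": "Critical",
--     "Client Error": "Medium",
--     "System Error": "High",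
--     "Resource Usage": "Medium",
--     "HTTP Activity": "Low",
--     "Info": "Low",
--     "Redirect": "Low",
--     "Other": "Low",
--     "System Activity": "Low",
-- }
--
-- # Severity as a numeric lattice: the answer is max(base rank, escalation rank).
-- LEVEL = {"Low": 0, "Medium": 1, "High": 2, "Critical": 3}
-- NAME = {0: "Low", 1: "Medium", 2: "High", 3: "Critical"}
--
-- # category -> (trigger substrings, escalated rank)
-- ESCALATION = {
--     "Security Alert": (("failed password", "unauthorized", "invalid user"), 3),
--     "System Error": (("timeout", "crash"), 3),
--     "Server Error": (("timeout", "crash"), 3),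
--     "Resource Usage": (("95%", "98%", "99%"), 2),
-- }
--
--
-- def assign_severity(category: str, log: str = ""):
--     text = log.lower()
--     rank = LEVEL[SEVERITY_MAP.get(category, "Low")]
--     rule = ESCALATION.get(category)
--     if rule is not None and any(t in text for t in rule[0]):
--         rank = max(rank, rule[1])
--     return NAME[rank]
-- ===== Notes on version B (the rewrite author's own statement) =====
-- stated objective: alternative
-- what changed: Recasts severity as a numeric lattice: B computes the category's base rank and, if a trigger substring fires, takes the max with the escalation rank, then maps the number back to a name, instead of A's first-match branch cascade returning strings.
import Mathlib
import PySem

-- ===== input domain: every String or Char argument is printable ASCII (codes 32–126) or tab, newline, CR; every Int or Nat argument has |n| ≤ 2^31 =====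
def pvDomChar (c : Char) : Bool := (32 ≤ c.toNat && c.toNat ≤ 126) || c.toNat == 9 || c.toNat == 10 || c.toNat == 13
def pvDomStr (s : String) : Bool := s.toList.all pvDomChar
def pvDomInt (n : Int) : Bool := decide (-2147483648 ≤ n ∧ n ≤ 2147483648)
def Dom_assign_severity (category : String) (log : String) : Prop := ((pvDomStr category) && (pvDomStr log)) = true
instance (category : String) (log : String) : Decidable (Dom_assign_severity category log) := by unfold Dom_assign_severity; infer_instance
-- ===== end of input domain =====

-- B recasts severity as a numeric lattice (rank = max of base rank and a fired escalation rank),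
-- replacing A's first-match branch cascade over strings (objective: alternative).
-- ===== PORT A =====
def SEVERITY_MAP : PySem.Dict String String := PySem.Dict.ofList
  [("Security Alert", "High"), ("Server Error", "Critical"), ("Client Error", "Medium"),
   ("System Error", "High"), ("Resource Usage", "Medium"), ("HTTP Activity", "Low"),
   ("Info", "Low"), ("Redirect", "Low"), ("Other", "Low"), ("System Activity", "Low")]

def assign_severity (category : String) (log : String) : String :=
  let log_lower := PySem.Str.lower log
  if category == "Security Alert" &&
      (["failed password", "unauthorized", "invalid user"].any (fun x => PySem.Str.isIn x log_lower)) then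
    "Critical"
  else if (category == "System Error" || category == "Server Error") &&
      (PySem.Str.isIn "timeout" log_lower || PySem.Str.isIn "crash" log_lower) then
    "Critical"
  else if category == "Resource Usage" &&
      (["95%", "98%", "99%"].any (fun x => PySem.Str.isIn x log_lower)) then
    "High"
  else
    SEVERITY_MAP.getD category "Low"

-- ===== PORT B =====
def LEVEL : PySem.Dict String Int := PySem.Dict.ofList
  [("Low", 0), ("Medium", 1), ("High", 2), ("Critical", 3)]

def NAME : PySem.Dict Int String := PySem.Dict.ofList
  [(0, "Low"), (1, "Medium"), (2, "High"), (3, "Critical")]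

def ESCALATION : PySem.Dict String (List String × Int) := PySem.Dict.ofList
  [("Security Alert", (["failed password", "unauthorized", "invalid user"], 3)),
   ("System Error", (["timeout", "crash"], 3)),
   ("Server Error", (["timeout", "crash"], 3)),
   ("Resource Usage", (["95%", "98%", "99%"], 2))]

def assign_severity_alt (category : String) (log : String) : String :=
  let text := PySem.Str.lower log
  -- LEVEL[...]: the key is always a value of SEVERITY_MAP or "Low", all present in LEVEL
  let rank : Int := (LEVEL.get? (SEVERITY_MAP.getD category "Low")).getD 0
  let rank : Int :=
    match ESCALATION.get? category with
    | some rule => if rule.1.any (fun t => PySem.Str.isIn t text) then max rank rule.2 else rank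
    | none => rank
  -- NAME[rank]: rank is always 0..3, all present in NAME
  (NAME.get? rank).getD "Low"

-- ===== PRECONDITION & SPEC =====
def Spec_assign_severity (category : String) (log : String) (out : String) : Prop := out = assign_severity_alt category log
instance (category : String) (log : String) (out : String) : Decidable (Spec_assign_severity category log out) := by unfold Spec_assign_severity; infer_instance

-- ===== CLAIM (what is proved, stated in full; the proofs are below) =====
def Claim_equal_assign_severity : Prop := ∀ (category : String) (log : String), Dom_assign_severity category log → Spec_assign_severity category log (assign_severity category log)

-- ===== LEMMAS AND PROOFS =====

-- B's rank round-trip: looking the base severity up in LEVEL and back through NAME is the identity.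
theorem name_level_roundtrip (c : String) :
    (NAME.get? ((LEVEL.get? (SEVERITY_MAP.getD c "Low")).getD 0)).getD "Low"
      = SEVERITY_MAP.getD c "Low" := by
  by_cases h : SEVERITY_MAP.contains c = true
  · have hmem : c ∈ SEVERITY_MAP.keys := (PySem.Dict.contains_iff_mem_keys _ _).mp h
    have hk : SEVERITY_MAP.keys = ["Security Alert", "Server Error", "Client Error",
        "System Error", "Resource Usage", "HTTP Activity", "Info", "Redirect", "Other",
        "System Activity"] := rfl
    rw [hk] at hmem
    simp only [List.mem_cons, List.not_mem_nil, or_false] at hmem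
    rcases hmem with rfl | rfl | rfl | rfl | rfl | rfl | rfl | rfl | rfl | rfl <;> rfl
  · have h' : SEVERITY_MAP.contains c = false := by
      cases hc : SEVERITY_MAP.contains c
      · rfl
      · exact absurd hc h
    rw [PySem.Dict.getD_of_not_contains (h := h')]
    rfl

theorem escalation_none (c : String) (h1 : c ≠ "Security Alert") (h2 : c ≠ "System Error")
    (h3 : c ≠ "Server Error") (h4 : c ≠ "Resource Usage") :
    ESCALATION.get? c = none := by
  simp only [ESCALATION, PySem.Dict.ofList, PySem.Dict.update, List.foldl,
    PySem.Dict.get?_insert, PySem.Dict.get?_empty]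
  simp [h1, h2, h3, h4]

theorem assign_severity_eq_alt (category log : String) :
    assign_severity category log = assign_severity_alt category log := by
  by_cases h1 : category = "Security Alert"
  · subst h1
    simp only [assign_severity, assign_severity_alt]
    have e : ESCALATION.get? "Security Alert"
        = some (["failed password", "unauthorized", "invalid user"], (3 : Int)) := rfl
    rw [e]
    by_cases hb : (["failed password", "unauthorized", "invalid user"].any
        (fun x => PySem.Str.isIn x (PySem.Str.lower log))) = true
    · simp only [hb]
      rfl
    · simp only [Bool.not_eq_true] at hb
      simp only [hb]
      rfl
  by_cases h2 : category = "System Error"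
  · subst h2
    simp only [assign_severity, assign_severity_alt]
    have e : ESCALATION.get? "System Error" = some (["timeout", "crash"], (3 : Int)) := rfl
    rw [e]
    by_cases hb : (["timeout", "crash"].any
        (fun x => PySem.Str.isIn x (PySem.Str.lower log))) = true
    · have hb' : (PySem.Str.isIn "timeout" (PySem.Str.lower log)
          || PySem.Str.isIn "crash" (PySem.Str.lower log)) = true := by simpa using hb
      simp only [hb, hb']
      rfl
    · simp only [Bool.not_eq_true] at hb
      have hb' : (PySem.Str.isIn "timeout" (PySem.Str.lower log)
          || PySem.Str.isIn "crash" (PySem.Str.lower log)) = false := by simpa using hb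
      simp only [hb, hb']
      rfl
  by_cases h3 : category = "Server Error"
  · subst h3
    simp only [assign_severity, assign_severity_alt]
    have e : ESCALATION.get? "Server Error" = some (["timeout", "crash"], (3 : Int)) := rfl
    rw [e]
    by_cases hb : (["timeout", "crash"].any
        (fun x => PySem.Str.isIn x (PySem.Str.lower log))) = true
    · have hb' : (PySem.Str.isIn "timeout" (PySem.Str.lower log)
          || PySem.Str.isIn "crash" (PySem.Str.lower log)) = true := by simpa using hb
      simp only [hb, hb']
      rfl
    · simp only [Bool.not_eq_true] at hb
      have hb' : (PySem.Str.isIn "timeout" (PySem.Str.lower log)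
          || PySem.Str.isIn "crash" (PySem.Str.lower log)) = false := by simpa using hb
      simp only [hb, hb']
      rfl
  by_cases h4 : category = "Resource Usage"
  · subst h4
    simp only [assign_severity, assign_severity_alt]
    have e : ESCALATION.get? "Resource Usage" = some (["95%", "98%", "99%"], (2 : Int)) := rfl
    rw [e]
    by_cases hb : (["95%", "98%", "99%"].any
        (fun x => PySem.Str.isIn x (PySem.Str.lower log))) = true
    · simp only [hb]
      rfl
    · simp only [Bool.not_eq_true] at hb
      simp only [hb]
      rfl
  · simp only [assign_severity, assign_severity_alt]
    rw [escalation_none category h1 h2 h3 h4]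
    have c1 : (category == "Security Alert") = false := by simpa using h1
    have c2 : (category == "System Error") = false := by simpa using h2
    have c3 : (category == "Server Error") = false := by simpa using h3
    have c4 : (category == "Resource Usage") = false := by simpa using h4
    simp only [c1, c2, c3, c4, Bool.false_and, Bool.or_self, Bool.false_eq_true, if_false]
    exact (name_level_roundtrip category).symm

-- ===== VERDICT (by name: the statement is the Claim_ definition above) =====
theorem assign_severity_spec : Claim_equal_assign_severity := by
  intro category log _
  unfold Spec_assign_severity
  exact assign_severity_eq_alt category log
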